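-- pv_equiv track=rewrite | github.com/ahyangyi/openttd-newgrfs | station/stations/dovemere_2018_lib/flexible_stations/common.py | determine_platform_odd
-- ===== SOURCE A (Python) =====
-- def determine_platform_odd(t, d):
--     if t > d:
--         return {"f": "n", "n": "f", "d": "d"}[determine_platform_odd(d, t)]
--     if (t + d) % 2 == 1:
--         return "fn"[t % 2]
--     if (t + d) % 4 == 0:
--         if t < d - 2:
--             return "fn"[t % 2]
--         return "d"
--     if t < d:
--         return "fn"[t % 2]
--     return "d"
-- ===== SOURCE B (Python) =====
-- def determine_platform_odd(t, d):
--     # Closed-form classification: the platform is "d" exactly when the two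
--     # coordinates coincide or differ by 2 with both odd; otherwise the letter
--     # is fixed by the parity of the smaller coordinate ('f' for even min),
--     # flipped when the arguments arrive in descending order.
--     gap = abs(t - d)
--     if gap == 0 or (gap == 2 and t % 2 == 1):
--         return "d"
--     if t <= d:
--         return "f" if t % 2 == 0 else "n"
--     return "n" if d % 2 == 0 else "f"
-- ===== Notes on version B (the rewrite author's own statement) =====
-- stated objective: simpler
-- what changed: Replaced A's recursive swap plus (t+d)%2/(t+d)%4 branch cascade with a closed-form classification: 'd' iff |t-d|==0 or (|t-d|==2 and both odd), otherwise the letter is determined by the parity of the smaller argument with a side-dependent flip.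
import Mathlib
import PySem

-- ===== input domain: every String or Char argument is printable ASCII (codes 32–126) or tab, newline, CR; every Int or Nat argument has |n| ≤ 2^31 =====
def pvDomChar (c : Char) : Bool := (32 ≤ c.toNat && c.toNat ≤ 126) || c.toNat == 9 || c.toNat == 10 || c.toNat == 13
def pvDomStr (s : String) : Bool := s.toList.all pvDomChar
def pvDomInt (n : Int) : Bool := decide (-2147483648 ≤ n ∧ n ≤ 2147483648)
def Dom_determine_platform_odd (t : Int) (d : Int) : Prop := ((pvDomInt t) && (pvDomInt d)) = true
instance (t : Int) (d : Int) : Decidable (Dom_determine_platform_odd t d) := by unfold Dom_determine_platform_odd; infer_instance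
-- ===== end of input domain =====

-- B replaces A's recursive swap and (t+d)%2/(t+d)%4 branch cascade by a
-- closed-form classification ('d' iff |t-d|=0 or |t-d|=2 with odd endpoints,
-- else parity of the smaller argument with a side-dependent flip); objective: simpler.

-- ===== PORT A =====
-- Python "fn"[i]: one-character string at index i ('none' is Python's IndexError, never reached since i ∈ {0,1})
def pyCharStr (s : String) (i : Int) : String :=
  match PySem.Str.pyGet? s i with
  | some c => String.singleton c
  | none => ""

def determine_platform_odd (t : Int) (d : Int) : String :=
  if t > d then
    ((PySem.Dict.ofList [("f", "n"), ("n", "f"), ("d", "d")]).get?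
      (determine_platform_odd d t)).getD ""   -- .getD "" is Python's KeyError branch, never reached
  else if PySem.Int.mod (t + d) 2 = 1 then
    pyCharStr "fn" (PySem.Int.mod t 2)
  else if PySem.Int.mod (t + d) 4 = 0 then
    if t < d - 2 then pyCharStr "fn" (PySem.Int.mod t 2) else "d"
  else if t < d then
    pyCharStr "fn" (PySem.Int.mod t 2)
  else "d"
termination_by (if t > d then (1 : Nat) else 0)
decreasing_by simp_all; omega

-- ===== PORT B =====
def determine_platform_odd_alt (t : Int) (d : Int) : String :=
  let gap := |t - d|
  if gap = 0 ∨ (gap = 2 ∧ PySem.Int.mod t 2 = 1) then "d"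
  else if t ≤ d then (if PySem.Int.mod t 2 = 0 then "f" else "n")
  else (if PySem.Int.mod d 2 = 0 then "n" else "f")

-- ===== PRECONDITION & SPEC =====
def Spec_determine_platform_odd (t : Int) (d : Int) (out : String) : Prop := out = determine_platform_odd_alt t d
instance (t : Int) (d : Int) (out : String) : Decidable (Spec_determine_platform_odd t d out) := by unfold Spec_determine_platform_odd; infer_instance

-- ===== CLAIM =====
def Claim_equal_determine_platform_odd : Prop := ∀ (t : Int) (d : Int), Dom_determine_platform_odd t d → Spec_determine_platform_odd t d (determine_platform_odd t d)

-- ===== LEMMAS AND PROOFS =====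

lemma mod2_cases (t : Int) : PySem.Int.mod t 2 = 0 ∨ PySem.Int.mod t 2 = 1 := by
  have h := PySem.Int.mod_eq_emod_of_pos (a := t) (b := 2) (by omega)
  omega

lemma charStr_eval (t : Int) :
    pyCharStr "fn" (PySem.Int.mod t 2) =
      (if PySem.Int.mod t 2 = 0 then "f" else "n") := by
  rcases mod2_cases t with h | h <;> rw [h] <;> decide

-- A on a non-swapped input (t ≤ d), in terms of B's closed-form condition.
lemma A_base_eval (t d : Int) (h : t ≤ d) :
    determine_platform_odd t d =
      if |t - d| = 0 ∨ (|t - d| = 2 ∧ PySem.Int.mod t 2 = 1) then "d"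
      else (if PySem.Int.mod t 2 = 0 then "f" else "n") := by
  rw [determine_platform_odd]
  simp only [show ¬ t > d by omega, if_false, charStr_eval]
  rw [show |t - d| = d - t from by rw [abs_sub_comm]; exact abs_of_nonneg (by omega)]
  simp only [PySem.Int.mod_eq_emod_of_pos (a := t + d) (b := 2) (by omega),
    PySem.Int.mod_eq_emod_of_pos (a := t + d) (b := 4) (by omega),
    PySem.Int.mod_eq_emod_of_pos (a := t) (b := 2) (by omega)]
  split_ifs <;> first | rfl | (exfalso; omega)

theorem determine_platform_odd_spec : Claim_equal_determine_platform_odd := by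
  unfold Claim_equal_determine_platform_odd Spec_determine_platform_odd
  intro t d _
  by_cases hswap : t > d
  · rw [determine_platform_odd]
    simp only [hswap, if_pos]
    rw [A_base_eval d t (by omega)]
    unfold determine_platform_odd_alt
    rw [show |d - t| = t - d from by rw [abs_sub_comm]; exact abs_of_nonneg (by omega),
       show |t - d| = t - d from abs_of_nonneg (by omega)]
    simp only [show ¬ t ≤ d by omega, if_false,
      PySem.Int.mod_eq_emod_of_pos (a := t) (b := 2) (by omega),
      PySem.Int.mod_eq_emod_of_pos (a := d) (b := 2) (by omega)]
    split_ifs <;> first | rfl | (exfalso; omega)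
  · rw [A_base_eval t d (by omega)]
    unfold determine_platform_odd_alt
    simp only [show t ≤ d by omega, if_pos]
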